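-- pv_equiv track=rewrite | github.com/t0rmentor/gittest | skrypt.py | liczNumerologieSlowa
-- ===== SOURCE A (Python) =====
-- def numerologicznaSumaCyfr(liczba):
--     #tak dlugo jak suma cyfr wieksza od 9 i nie jest liczbą mistrzowską (podzielną przez 11)
--     while (liczba%11 !=0 and liczba > 9 ):
--         liczba = sum(int(digit) for digit in str(liczba))
--     return liczba
--
-- def liczNumerologieSlowa(slowo):
--     slownik = {'a':1,
--                'b':2,
--                'c':3,
--                'd':4,
--                'e':5,
--                'f':6,
--                'g':7,
--                'h':8,
--                'i':9,
--                'j':1,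
--                'k':2,
--                'l':3,
--                'm':4,
--                'n':5,
--                'o':6,
--                'p':7,
--                'q':8,
--                'r':9,
--                's':1,
--                't':2,
--                'u':3,
--                'v':4,
--                'w':5,
--                'x':6,
--                'y':7,
--                'z':8 }
--
--     suma=0
--     for litera in slowo.lower():
--         for key in slownik:
--             if litera == key:
--                 suma+=slownik[key]
--     return numerologicznaSumaCyfr(suma)
-- ===== SOURCE B (Python) =====
-- def numerologicznaSumaCyfr(liczba):
--     # recursive reduction: stop at master numbers (divisible by 11) or single digits
--     if liczba % 11 == 0 or liczba <= 9:
--         return liczba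
--     return numerologicznaSumaCyfr(sum(int(d) for d in str(liczba)))
--
-- def liczNumerologieSlowa(slowo):
--     litery = list(slowo.lower())
--     suma = sum(litery.count(chr(97 + i)) * (i % 9 + 1) for i in range(26))
--     return numerologicznaSumaCyfr(suma)
-- ===== Notes on version B (the rewrite author's own statement) =====
-- stated objective: alternative
-- what changed: B traverses the alphabet instead of the word: for each of the 26 letters it counts its occurrences in the lowered word (list.count) and multiplies by the letter's value (i%9+1), replacing A's per-character scan of a 26-entry dict; the digit reduction is recursive instead of a while-loop.
import Mathlib
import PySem

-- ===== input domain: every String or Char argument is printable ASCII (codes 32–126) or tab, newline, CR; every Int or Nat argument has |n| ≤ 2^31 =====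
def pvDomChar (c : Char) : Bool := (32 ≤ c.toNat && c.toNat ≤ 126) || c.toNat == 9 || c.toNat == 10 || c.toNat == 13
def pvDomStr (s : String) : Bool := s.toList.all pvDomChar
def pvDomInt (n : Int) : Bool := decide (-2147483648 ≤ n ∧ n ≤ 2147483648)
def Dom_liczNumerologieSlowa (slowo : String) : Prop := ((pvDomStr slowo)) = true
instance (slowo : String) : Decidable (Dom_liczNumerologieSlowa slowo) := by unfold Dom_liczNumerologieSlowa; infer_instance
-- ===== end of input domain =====

-- B traverses the ALPHABET instead of the word: it counts each of the 26 letters in the lowered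
-- word once and multiplies by its value (i%9+1), replacing the per-character scan of a 26-entry
-- dict; the digit reduction is recursive instead of a while-loop. Alternative decomposition.

-- ===== PORT A =====
-- sum(int(digit) for digit in str(liczba)); the `getD 0` only guards totality: the loop below
-- calls this with liczba > 9 only, where every character of str(liczba) is a digit.
def pyDigitSum (liczba : Int) : Int :=
  ((PySem.Int.toChars liczba).map (fun digit => (PySem.Int.ofChars? [digit]).getD 0)).sum

-- A's while-loop; fuel only guards totality (for liczba > 9 the digit sum strictly decreases,
-- so liczba.toNat + 1 iterations always suffice)
def sumaLoop : Nat → Int → Int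
  | 0, liczba => liczba
  | fuel + 1, liczba =>
      if PySem.Int.mod liczba 11 ≠ 0 ∧ liczba > 9 then sumaLoop fuel (pyDigitSum liczba)
      else liczba

def numerologicznaSumaCyfr (liczba : Int) : Int := sumaLoop (liczba.toNat + 1) liczba

def slownik : PySem.Dict Char Int := PySem.Dict.ofList
  [('a',1),('b',2),('c',3),('d',4),('e',5),('f',6),('g',7),('h',8),('i',9),
   ('j',1),('k',2),('l',3),('m',4),('n',5),('o',6),('p',7),('q',8),('r',9),
   ('s',1),('t',2),('u',3),('v',4),('w',5),('x',6),('y',7),('z',8)]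

def liczNumerologieSlowa (slowo : String) : Int :=
  numerologicznaSumaCyfr
    ((PySem.Str.lower slowo).toList.foldl
      (fun suma litera =>
        (PySem.Dict.keys slownik).foldl
          (fun suma key => if litera == key then suma + PySem.Dict.getD slownik key 0 else suma)
          suma)
      0)

-- ===== PORT B =====
-- Source B's recursive reduction; fuel only guards totality (same bound as A's loop)
def redukuj : Nat → Int → Int
  | 0, liczba => liczba
  | fuel + 1, liczba =>
      if PySem.Int.mod liczba 11 = 0 ∨ liczba ≤ 9 then liczba
      else redukuj fuel (pyDigitSum liczba)

def numerologicznaSumaCyfrAlt (liczba : Int) : Int := redukuj (liczba.toNat + 1) liczba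

def liczNumerologieSlowa_alt (slowo : String) : Int :=
  let litery := (PySem.Str.lower slowo).toList
  numerologicznaSumaCyfrAlt
    (((PySem.List.pyRange 0 26 1).map
        (fun i => (PySem.List.count litery (Char.ofNat (97 + i).toNat) : Int)
                    * (PySem.Int.mod i 9 + 1))).sum)

-- ===== PRECONDITION & SPEC =====
def Spec_liczNumerologieSlowa (slowo : String) (out : Int) : Prop := out = liczNumerologieSlowa_alt slowo
instance (slowo : String) (out : Int) : Decidable (Spec_liczNumerologieSlowa slowo out) := by unfold Spec_liczNumerologieSlowa; infer_instance

-- ===== CLAIM (what is proved, stated in full; the proofs are below) =====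
def Claim_equal_liczNumerologieSlowa : Prop := ∀ (slowo : String), Dom_liczNumerologieSlowa slowo → Spec_liczNumerologieSlowa slowo (liczNumerologieSlowa slowo)

-- ===== LEMMAS AND PROOFS =====

-- the two reductions agree at every fuel
lemma sumaLoop_eq_redukuj (fuel : Nat) : ∀ n : Int, sumaLoop fuel n = redukuj fuel n := by
  induction fuel with
  | zero => intro n; rfl
  | succ f ih =>
      intro n
      show (if PySem.Int.mod n 11 ≠ 0 ∧ n > 9 then sumaLoop f (pyDigitSum n) else n)
         = (if PySem.Int.mod n 11 = 0 ∨ n ≤ 9 then n else redukuj f (pyDigitSum n))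
      by_cases h : PySem.Int.mod n 11 = 0 ∨ n ≤ 9
      · rw [if_pos h, if_neg (by rintro ⟨h1, h2⟩; rcases h with h | h; exacts [h1 h, by omega])]
      · have h' : PySem.Int.mod n 11 ≠ 0 ∧ n > 9 := by push Not at h; exact ⟨h.1, h.2⟩
        rw [if_pos h', if_neg h]
        exact ih _

-- A's per-character inner dict scan as a weight function
def wagaA (c : Char) : Int :=
  ((PySem.Dict.keys slownik).map
    (fun key => if c == key then PySem.Dict.getD slownik key 0 else 0)).sum

-- lowering an ASCII character stays ASCII
lemma lowerChar_lt_128 (c : Char) (h : c.toNat < 128) : (PySem.Chars.lowerChar c).toNat < 128 := by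
  have key : ∀ i : Fin 128, (PySem.Chars.lowerChar (Char.ofNat i.val)).toNat < 128 := by decide
  have := key ⟨c.toNat, h⟩
  simpa [Char.ofNat_toNat] using this

-- A's weight of an ASCII character written as a 26-term indicator sum over the alphabet
set_option maxRecDepth 16384 in
lemma wagaA_eq_indicator (c : Char) (h : c.toNat < 128) :
    wagaA c = ((List.range 26).map
      (fun k => if c == Char.ofNat (97 + k) then ((k % 9 + 1 : Nat) : Int) else 0)).sum := by
  have key : ∀ i : Fin 128, wagaA (Char.ofNat i.val)
      = ((List.range 26).map
          (fun k => if Char.ofNat i.val == Char.ofNat (97 + k) then ((k % 9 + 1 : Nat) : Int) else 0)).sum := by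
    decide
  have := key ⟨c.toNat, h⟩
  simpa [Char.ofNat_toNat] using this

-- the counting identity: sum of per-character weights = alphabet-indexed count sum
lemma sum_wagaA_eq_count (l : List Char) (h : ∀ c ∈ l, c.toNat < 128) :
    (l.map wagaA).sum
      = ((List.range 26).map
          (fun k => (l.count (Char.ofNat (97 + k)) : Int) * ((k % 9 + 1 : Nat) : Int))).sum := by
  induction l with
  | nil => simp
  | cons c t ih =>
      have hc : c.toNat < 128 := h c (List.mem_cons_self ..)
      have ht : ∀ x ∈ t, x.toNat < 128 := fun x hx => h x (List.mem_cons_of_mem _ hx)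
      have hterm : ∀ k : Nat,
          ((c :: t).count (Char.ofNat (97 + k)) : Int) * ((k % 9 + 1 : Nat) : Int)
          = (t.count (Char.ofNat (97 + k)) : Int) * ((k % 9 + 1 : Nat) : Int)
            + (if c == Char.ofNat (97 + k) then ((k % 9 + 1 : Nat) : Int) else 0) := by
        intro k
        rw [List.count_cons]
        split <;> push_cast <;> ring
      simp only [List.map_cons, List.sum_cons, hterm,
        PySem.List.sum_map_add_int, ih ht, wagaA_eq_indicator c hc]
      ring
  
-- ===== VERDICT (by name: the statement is the Claim_ definition above) =====
theorem liczNumerologieSlowa_spec : Claim_equal_liczNumerologieSlowa := by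
  intro slowo hdom
  unfold Spec_liczNumerologieSlowa liczNumerologieSlowa liczNumerologieSlowa_alt
  show numerologicznaSumaCyfr _ = numerologicznaSumaCyfrAlt _
  have hlt : ∀ c ∈ (PySem.Str.lower slowo).toList, c.toNat < 128 := by
    intro c hc
    rw [PySem.Str.toList_lower] at hc
    obtain ⟨d, hd, rfl⟩ := List.mem_map.mp hc
    have hdall : pvDomChar d = true := by
      have := (List.all_eq_true.mp hdom) d hd
      simpa using this
    apply lowerChar_lt_128
    simp only [pvDomChar, Bool.or_eq_true, Bool.and_eq_true, decide_eq_true_eq, beq_iff_eq] at hdall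
    omega
  -- A's suma = B's suma
  have hsum :
      (PySem.Str.lower slowo).toList.foldl
        (fun suma litera =>
          (PySem.Dict.keys slownik).foldl
            (fun suma key => if litera == key then suma + PySem.Dict.getD slownik key 0 else suma)
            suma) 0
      = ((PySem.List.pyRange 0 26 1).map
          (fun i => (PySem.List.count ((PySem.Str.lower slowo).toList) (Char.ofNat (97 + i).toNat) : Int)
                      * (PySem.Int.mod i 9 + 1))).sum := by
    have hinner : ∀ (acc : Int) (c : Char), c ∈ (PySem.Str.lower slowo).toList →
        (PySem.Dict.keys slownik).foldl
          (fun s key => if c == key then s + PySem.Dict.getD slownik key 0 else s) acc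
        = acc + wagaA c := by
      intro acc c _
      have hfun : (fun (s : Int) (key : Char) => if c == key then s + PySem.Dict.getD slownik key 0 else s)
          = fun s key => s + (if c == key then PySem.Dict.getD slownik key 0 else 0) := by
        funext s k; split <;> simp
      rw [hfun, PySem.List.foldl_add]; rfl
    rw [PySem.List.foldl_congr_mem _ _ (fun s c => s + wagaA c) _ hinner, PySem.List.foldl_add, zero_add]
    rw [sum_wagaA_eq_count _ hlt]
    rw [PySem.List.pyRange_one, List.map_map]
    apply congrArg
    apply List.map_congr_left
    intro k hk
    have hk26 : k < 26 := by simpa using List.mem_range.mp (by simpa using hk)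
    have h1 : ((0 : Int) + (k : Int)) = (k : Int) := by ring
    have h2 : ((97 : Int) + (k : Int)).toNat = 97 + k := by omega
    have h3 : PySem.Int.mod (k : Int) 9 = ((k % 9 : Nat) : Int) := by
      simp [PySem.Int.mod]
      rw [Int.fmod_eq_emod]
      simp
    simp only [Function.comp, h1, h2, h3, PySem.List.count_eq]
    push_cast
    ring
  rw [hsum]
  unfold numerologicznaSumaCyfr numerologicznaSumaCyfrAlt
  exact sumaLoop_eq_redukuj _ _
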